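-- pv_equiv track=rewrite | github.com/tosmart01/poly-analysis | analysis_poly/activity_discovery.py | _iter_aligned_windows
-- ===== SOURCE A (Python) =====
-- def _iter_aligned_windows(start_ts: int, end_ts: int, window_sec: int) -> list[tuple[int, int]]:
--     if start_ts > end_ts:
--         return []
--
--     windows: list[tuple[int, int]] = []
--     current = start_ts
--     while current <= end_ts:
--         window_start = (current // window_sec) * window_sec
--         window_end = min(window_start + window_sec - 1, end_ts)
--         windows.append((current, window_end))
--         current = window_end + 1
--     return windows
-- ===== SOURCE B (Python) =====
-- def _iter_aligned_windows(start_ts: int, end_ts: int, window_sec: int) -> list[tuple[int, int]]: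
--     if start_ts > end_ts:
--         return []
--     first_end = min((start_ts // window_sec) * window_sec + window_sec - 1, end_ts)
--     return [(start_ts, first_end)] + [
--         (b, min(b + window_sec - 1, end_ts))
--         for b in range(first_end + 1, end_ts + 1, window_sec)
--     ]
-- ===== Notes on version B (the rewrite author's own statement) =====
-- stated objective: alternative
-- what changed: Replaces A's data-dependent while-loop (re-aligning every step with floor division) with a single floor division for the first window plus an arithmetic-progression range over the remaining aligned boundaries, consumed by a comprehension.
import Mathlib
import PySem

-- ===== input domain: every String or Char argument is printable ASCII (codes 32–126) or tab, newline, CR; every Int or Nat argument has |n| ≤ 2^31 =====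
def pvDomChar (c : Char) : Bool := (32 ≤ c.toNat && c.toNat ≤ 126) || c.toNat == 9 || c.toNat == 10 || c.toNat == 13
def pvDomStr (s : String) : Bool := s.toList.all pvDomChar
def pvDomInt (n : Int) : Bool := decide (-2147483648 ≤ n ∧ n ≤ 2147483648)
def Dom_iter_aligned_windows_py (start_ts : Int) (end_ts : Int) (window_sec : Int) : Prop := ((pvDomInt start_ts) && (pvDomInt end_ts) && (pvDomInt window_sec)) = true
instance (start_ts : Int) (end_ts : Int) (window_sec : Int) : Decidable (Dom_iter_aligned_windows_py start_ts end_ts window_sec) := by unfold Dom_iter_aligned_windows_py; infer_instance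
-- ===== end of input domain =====

-- B replaces A's data-dependent while-loop (which floor-divides at every step) with one floor
-- division for the first window plus an arithmetic-progression range of the remaining aligned
-- boundaries, consumed by a comprehension (objective: alternative decomposition, same cost).

-- ===== PORT A =====
-- A's while-loop as structural recursion on fuel; the fuel merely makes the same computation
-- total (on Pre_ the loop runs at most (end_ts - start_ts).toNat + 1 iterations).
def iterA_loop (end_ts : Int) (window_sec : Int) : Nat → Int → List (Int × Int)
  | 0, _ => []
  | fuel + 1, current =>
    if current ≤ end_ts then
      let window_start := PySem.Int.floordiv current window_sec * window_sec
      let window_end := min (window_start + window_sec - 1) end_ts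
      (current, window_end) :: iterA_loop end_ts window_sec fuel (window_end + 1)
    else []

def iter_aligned_windows_py (start_ts : Int) (end_ts : Int) (window_sec : Int) : List (Int × Int) :=
  if start_ts > end_ts then []
  else iterA_loop end_ts window_sec ((end_ts - start_ts).toNat + 1) start_ts

-- ===== PORT B =====
def iter_aligned_windows_py_alt (start_ts : Int) (end_ts : Int) (window_sec : Int) : List (Int × Int) :=
  if start_ts > end_ts then []
  else
    let first_end := min (PySem.Int.floordiv start_ts window_sec * window_sec + window_sec - 1) end_ts
    [(start_ts, first_end)] ++
      (PySem.List.pyRange (first_end + 1) (end_ts + 1) window_sec).map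
        (fun b => (b, min (b + window_sec - 1) end_ts))

-- ===== PRECONDITION & SPEC =====
-- Pre_ excludes window_sec ≤ 0 with start_ts ≤ end_ts: there A raises ZeroDivisionError
-- (window_sec = 0) or never terminates (window_sec < 0); when start_ts > end_ts A returns []
-- before touching window_sec, so those inputs stay admitted.
def Pre_iter_aligned_windows_py (start_ts : Int) (end_ts : Int) (window_sec : Int) : Prop :=
  1 ≤ window_sec ∨ end_ts < start_ts
instance (start_ts : Int) (end_ts : Int) (window_sec : Int) : Decidable (Pre_iter_aligned_windows_py start_ts end_ts window_sec) := by unfold Pre_iter_aligned_windows_py; infer_instance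

def pvWitness_iter_aligned_windows_py : Int × Int × Int := (-4, 17, 5)

def Spec_iter_aligned_windows_py (start_ts : Int) (end_ts : Int) (window_sec : Int) (out : List (Int × Int)) : Prop := out = iter_aligned_windows_py_alt start_ts end_ts window_sec
instance (start_ts : Int) (end_ts : Int) (window_sec : Int) (out : List (Int × Int)) : Decidable (Spec_iter_aligned_windows_py start_ts end_ts window_sec out) := by unfold Spec_iter_aligned_windows_py; infer_instance

-- ===== CLAIM (what is proved, stated in full; the proofs are below) =====
def Claim_equal_iter_aligned_windows_py : Prop := ∀ (start_ts : Int) (end_ts : Int) (window_sec : Int), Dom_iter_aligned_windows_py start_ts end_ts window_sec → Pre_iter_aligned_windows_py start_ts end_ts window_sec → Spec_iter_aligned_windows_py start_ts end_ts window_sec (iter_aligned_windows_py start_ts end_ts window_sec)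

-- ===== LEMMAS AND PROOFS =====

-- pyRange with a positive step is empty once start ≥ stop.
lemma pyRange_pos_nil (a b s : Int) (hs : 0 < s) (hba : b ≤ a) :
    PySem.List.pyRange a b s = [] := by
  rw [PySem.List.pyRange_of_pos a b hs]
  simp [show ¬ a < b by omega]

-- pyRange with a positive step and start < stop peels off its head.
lemma pyRange_pos_cons (a b s : Int) (hs : 0 < s) (hab : a < b) :
    PySem.List.pyRange a b s = a :: PySem.List.pyRange (a + s) b s := by
  rw [PySem.List.pyRange_of_pos a b hs, PySem.List.pyRange_of_pos (a + s) b hs]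
  have hne : s ≠ 0 := by omega
  have hshift : (b - (a + s) + s - 1) / s = (b - a + s - 1) / s - 1 := by
    have := Int.add_mul_ediv_right (b - a + s - 1) (-1) hne
    have heq : b - (a + s) + s - 1 = b - a + s - 1 + (-1) * s := by ring
    rw [heq, this]; ring
  have hpos : 1 ≤ (b - a + s - 1) / s := by
    rw [Int.le_ediv_iff_mul_le hs]; omega
  by_cases h2 : a + s < b
  · simp only [if_pos hab, if_pos h2, hshift]
    have : ((b - a + s - 1) / s).toNat = ((b - a + s - 1) / s - 1).toNat + 1 := by omega
    rw [this, List.range_succ_eq_map]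
    simp only [List.map_cons, List.map_map]
    congr 1
    · simp
    · apply List.map_congr_left
      intro k _
      simp only [Function.comp_apply]
      push_cast
      ring
  · -- only one element: the count is exactly 1
    have h1 : (b - a + s - 1) / s = 1 := by
      have hge : 1 ≤ (b - a + s - 1) / s := hpos
      have hlt : (b - a + s - 1) / s < 2 := by
        rw [Int.ediv_lt_iff_lt_mul hs]; omega
      omega
    simp [if_pos hab, if_neg h2, h1, List.range_succ]

-- A's loop returns [] whenever current already exceeds end_ts, for any fuel.
lemma iterA_loop_gt (e w : Int) (fuel : Nat) (c : Int) (h : e < c) :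
    iterA_loop e w fuel c = [] := by
  cases fuel with
  | zero => rfl
  | succ n => simp [iterA_loop, show ¬ c ≤ e by omega]

-- On an aligned current, A's loop is exactly B's comprehension over the remaining boundaries.
lemma iterA_loop_aligned (e w : Int) (hw : 1 ≤ w) :
    ∀ (fuel : Nat) (c : Int), c % w = 0 → ((e + 1) - c).toNat ≤ fuel →
      iterA_loop e w fuel c =
        (PySem.List.pyRange c (e + 1) w).map (fun b => (b, min (b + w - 1) e)) := by
  intro fuel
  induction fuel with
  | zero =>
    intro c _ hf
    have : e + 1 ≤ c := by omega
    rw [pyRange_pos_nil c (e + 1) w (by omega) this]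
    rfl
  | succ n ih =>
    intro c hal hf
    by_cases hc : c ≤ e
    · have hfd : PySem.Int.floordiv c w * w = c := by
        rw [PySem.Int.floordiv_eq_ediv_of_pos (show (0:Int) < w by omega)]
        have h1 := Int.mul_ediv_add_emod c w
        have h2 : w * (c / w) = c / w * w := mul_comm _ _
        have h3 : c % w = 0 := hal
        omega
      rw [pyRange_pos_cons c (e + 1) w (by omega) (by omega)]
      simp only [iterA_loop, if_pos hc, hfd, List.map_cons]
      congr 1
      by_cases h2 : c + w - 1 ≤ e
      · have hmin : min (c + w - 1) e = c + w - 1 := by omega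
        rw [hmin]
        have : c + w - 1 + 1 = c + w := by ring
        rw [this]
        have hal' : (c + w) % w = 0 := by rw [Int.add_emod_right]; exact hal
        exact ih (c + w) hal' (by omega)
      · have hmin : min (c + w - 1) e = e := by omega
        rw [hmin]
        rw [iterA_loop_gt e w n (e + 1) (by omega)]
        rw [pyRange_pos_nil (c + w) (e + 1) w (by omega) (by omega)]
        rfl
    · rw [iterA_loop_gt e w (n + 1) c (by omega)]
      rw [pyRange_pos_nil c (e + 1) w (by omega) (by omega)]
      rfl

-- ===== VERDICT (by name: the statement is the Claim_ definition above) =====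
theorem iter_aligned_windows_py_spec : Claim_equal_iter_aligned_windows_py := by
  intro s e w _ hpre
  unfold Spec_iter_aligned_windows_py iter_aligned_windows_py iter_aligned_windows_py_alt
  by_cases hse : s > e
  · simp [hse]
  · have hw : 1 ≤ w := by
      rcases hpre with h | h
      · exact h
      · omega
    simp only [if_neg hse]
    have hs_le : s ≤ e := by omega
    -- unfold one step of the loop: the first (possibly unaligned) window
    have hfuel : (e - s).toNat + 1 = ((e - s).toNat) + 1 := rfl
    rw [show (e - s).toNat + 1 = Nat.succ (e - s).toNat from rfl]
    simp only [iterA_loop, if_pos hs_le]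
    have hde := Int.mul_ediv_add_emod s w
    have hcm : w * (s / w) = s / w * w := mul_comm _ _
    have hmod0 := Int.emod_nonneg s (show w ≠ 0 by omega)
    have hmodlt := Int.emod_lt_of_pos s (show 0 < w by omega)
    rw [PySem.Int.floordiv_eq_ediv_of_pos (show (0:Int) < w by omega)]
    set ws := s / w * w with hws
    have hws_le : ws ≤ s := by omega
    have hws_gt : s < ws + w := by omega
    have hwsdvd : ws % w = 0 := by
      simp [hws]
    simp only [List.singleton_append]
    congr 1
    by_cases h2 : ws + w - 1 ≤ e
    · have hmin : min (ws + w - 1) e = ws + w - 1 := by omega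
      rw [hmin]
      have : ws + w - 1 + 1 = ws + w := by ring
      rw [this]
      have hal : (ws + w) % w = 0 := by rw [Int.add_emod_right]; exact hwsdvd
      rw [iterA_loop_aligned e w hw (e - s).toNat (ws + w) hal (by omega)]
    · have hmin : min (ws + w - 1) e = e := by omega
      rw [hmin]
      rw [iterA_loop_gt e w (e - s).toNat (e + 1) (by omega)]
      rw [pyRange_pos_nil (e + 1) (e + 1) w (by omega) (by omega)]
      rfl
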